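-- pv_equiv track=rewrite | github.com/andretadeu/jhu-immuno | code/blosumDistance.py | score_pairwise
-- ===== SOURCE A (Python) =====
-- def score_match(pair, matrix):
--     if pair not in matrix:
--         return matrix[(tuple(reversed(pair)))]
--     else:
--         return matrix[pair]
--
-- def score_pairwise(seq1, seq2, matrix, gap_s, gap_e):
--     score = 0
--     gap = False
--     for i in range(len(seq1)):
--         pair = (seq1[i], seq2[i])
--         if not gap:
--             if '-' in pair:
--                 gap = True
--                 score += gap_s
--             else:
--                 score += score_match(pair, matrix)
--         else:
--             if '-' not in pair:
--                 gap = False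
--                 score += score_match(pair, matrix)
--             else:
--                 score += gap_e
--     return score
-- ===== SOURCE B (Python) =====
-- def score_pairwise(seq1, seq2, matrix, gap_s, gap_e):
--     # Three independent aggregate passes instead of a sequential state machine:
--     # a gap-flag list, the matrix-score sum over non-gap columns, the number of
--     # gap columns, and the number of gap-run starts (flag list zipped with its shift).
--     flags = [seq1[i] == '-' or seq2[i] == '-' for i in range(len(seq1))]
--     match_sum = 0
--     for i, f in enumerate(flags):
--         if not f:
--             a, b = seq1[i], seq2[i]
--             match_sum += matrix[(a, b)] if (a, b) in matrix else matrix[(b, a)]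
--     gaps = sum(flags)
--     starts = sum(1 for prev, cur in zip([False] + flags, flags) if cur and not prev)
--     return match_sum + gap_s * starts + gap_e * (gaps - starts)
-- ===== Notes on version B (the rewrite author's own statement) =====
-- stated objective: alternative
-- what changed: Replaces A's sequential boolean gap-state machine with stateless aggregate passes: a gap-flag list, the matrix-score sum over non-gap columns, the count of gap columns, and the count of gap-run starts obtained by zipping the flag list with its shift; the result is the closed form match_sum + gap_s*starts + gap_e*(gaps-starts).
import Mathlib
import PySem

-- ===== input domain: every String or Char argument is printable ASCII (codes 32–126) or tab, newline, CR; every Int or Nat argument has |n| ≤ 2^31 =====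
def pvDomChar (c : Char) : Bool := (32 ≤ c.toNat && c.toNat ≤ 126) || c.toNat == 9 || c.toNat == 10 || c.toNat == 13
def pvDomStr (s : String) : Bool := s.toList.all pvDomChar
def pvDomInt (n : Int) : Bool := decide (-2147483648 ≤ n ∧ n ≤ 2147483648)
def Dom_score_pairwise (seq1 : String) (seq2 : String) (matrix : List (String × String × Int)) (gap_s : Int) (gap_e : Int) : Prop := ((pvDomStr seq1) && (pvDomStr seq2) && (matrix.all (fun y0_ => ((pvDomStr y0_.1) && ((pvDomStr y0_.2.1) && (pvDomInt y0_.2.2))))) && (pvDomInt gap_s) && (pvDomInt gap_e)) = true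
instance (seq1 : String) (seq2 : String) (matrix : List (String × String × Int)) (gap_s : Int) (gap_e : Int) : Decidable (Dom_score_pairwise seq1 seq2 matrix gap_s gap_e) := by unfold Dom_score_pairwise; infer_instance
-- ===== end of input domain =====

-- B replaces A's sequential gap-state machine by stateless aggregate passes (flag list,
-- match-score sum, gap count, run-start count via zip with the shifted flag list) and a
-- closed-form combination (alternative decomposition, same cost). Return value only;
-- neither program mutates its arguments.

-- ===== PORT A =====
-- dict lookup (first match on the (row, col) key pair), shared primitive of both sides
def pvFind (matrix : List (String × String × Int)) (a b : String) : Option Int :=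
  (matrix.find? (fun e => e.1 == a && e.2.1 == b)).map (·.2.2)

-- A's helper score_match, step for step ('pair not in matrix' then reversed lookup);
-- the .getD 0 stands where Python raises KeyError (excluded by Pre_)
def score_match (pair : String × String) (matrix : List (String × String × Int)) : Int :=
  if (pvFind matrix pair.1 pair.2).isNone then
    (pvFind matrix pair.2 pair.1).getD 0
  else
    (pvFind matrix pair.1 pair.2).getD 0

def score_pairwise (seq1 : String) (seq2 : String) (matrix : List (String × String × Int)) (gap_s : Int) (gap_e : Int) : Int :=
  ((PySem.List.pyRange 0 (PySem.Str.len seq1) 1).foldl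
    (fun (st : Int × Bool) i =>
      let pair : String × String :=
        (((PySem.Str.pyGet? seq1 i).getD ' ').toString, ((PySem.Str.pyGet? seq2 i).getD ' ').toString)
      if !st.2 then
        if pair.1 = "-" ∨ pair.2 = "-" then (st.1 + gap_s, true)
        else (st.1 + score_match pair matrix, false)
      else
        if ¬ (pair.1 = "-" ∨ pair.2 = "-") then (st.1 + score_match pair matrix, false)
        else (st.1 + gap_e, true))
    (0, false)).1

-- ===== PORT B =====
-- the aligned pair at index i (seq1[i], seq2[i]) as Python length-1 strings
def pvPairAt (seq1 seq2 : String) (i : Int) : String × String :=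
  (((PySem.Str.pyGet? seq1 i).getD ' ').toString, ((PySem.Str.pyGet? seq2 i).getD ' ').toString)

-- is the aligned column at index i a gap column?  (seq1[i] == '-' or seq2[i] == '-')
def pvFlagAt (seq1 seq2 : String) (i : Int) : Bool :=
  (pvPairAt seq1 seq2 i).1 == "-" || (pvPairAt seq1 seq2 i).2 == "-"

def score_pairwise_alt (seq1 : String) (seq2 : String) (matrix : List (String × String × Int)) (gap_s : Int) (gap_e : Int) : Int :=
  let idxs := PySem.List.pyRange 0 (PySem.Str.len seq1) 1
  let flags := idxs.map (pvFlagAt seq1 seq2)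
  let match_sum := idxs.foldl
    (fun s i =>
      if !(pvFlagAt seq1 seq2 i) then
        let a := (pvPairAt seq1 seq2 i).1
        let b := (pvPairAt seq1 seq2 i).2
        s + (if (pvFind matrix a b).isSome then (pvFind matrix a b).getD 0
             else (pvFind matrix b a).getD 0)
      else s) 0
  let gaps : Int := (flags.count true : Nat)
  let starts : Int := (((false :: flags).zip flags).countP (fun p => p.2 && !p.1) : Nat)
  match_sum + gap_s * starts + gap_e * (gaps - starts)

-- ===== PRECONDITION & SPEC =====
-- Pre_ excludes exactly the inputs on which A raises: seq2 shorter than seq1 (IndexError)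
-- or some aligned non-gap pair found in the matrix neither directly nor reversed (KeyError).
def Pre_score_pairwise (seq1 : String) (seq2 : String) (matrix : List (String × String × Int)) (gap_s : Int) (gap_e : Int) : Prop :=
  seq1.toList.length ≤ seq2.toList.length ∧
  ((seq1.toList.zip seq2.toList).all (fun p =>
      p.1 == '-' || p.2 == '-' ||
      (pvFind matrix p.1.toString p.2.toString).isSome ||
      (pvFind matrix p.2.toString p.1.toString).isSome)) = true
instance (seq1 : String) (seq2 : String) (matrix : List (String × String × Int)) (gap_s : Int) (gap_e : Int) : Decidable (Pre_score_pairwise seq1 seq2 matrix gap_s gap_e) := by unfold Pre_score_pairwise; infer_instance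

def pvWitness_score_pairwise : String × String × (List (String × String × Int)) × Int × Int :=
  ("AB-C", "AAC-", [("A", "A", 4), ("A", "B", -2)], -10, -1)

def Spec_score_pairwise (seq1 : String) (seq2 : String) (matrix : List (String × String × Int)) (gap_s : Int) (gap_e : Int) (out : Int) : Prop := out = score_pairwise_alt seq1 seq2 matrix gap_s gap_e
instance (seq1 : String) (seq2 : String) (matrix : List (String × String × Int)) (gap_s : Int) (gap_e : Int) (out : Int) : Decidable (Spec_score_pairwise seq1 seq2 matrix gap_s gap_e out) := by unfold Spec_score_pairwise; infer_instance

-- ===== CLAIM (what is proved, stated in full; the proofs are below) =====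
def Claim_equal_score_pairwise : Prop := ∀ (seq1 : String) (seq2 : String) (matrix : List (String × String × Int)) (gap_s : Int) (gap_e : Int), Dom_score_pairwise seq1 seq2 matrix gap_s gap_e → Pre_score_pairwise seq1 seq2 matrix gap_s gap_e → Spec_score_pairwise seq1 seq2 matrix gap_s gap_e (score_pairwise seq1 seq2 matrix gap_s gap_e)

-- ===== LEMMAS AND PROOFS =====

-- gap test on a pair (proof-side vocabulary)
def pvIsGap (p : String × String) : Bool := p.1 == "-" || p.2 == "-"

-- match-score sum over the non-gap pairs
def pvM (matrix : List (String × String × Int)) : List (String × String) → Int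
  | [] => 0
  | p :: r => (if pvIsGap p then 0 else score_match p matrix) + pvM matrix r

-- number of gap-run starts over a flag list, given the previous column's flag
def pvSB (g : Bool) : List Bool → Int
  | [] => 0
  | f :: r => (if f && !g then 1 else 0) + pvSB f r

-- B's inline lookup-with-fallback equals A's score_match
lemma pvMatch_eq (matrix : List (String × String × Int)) (p : String × String) :
    (if (pvFind matrix p.1 p.2).isSome then (pvFind matrix p.1 p.2).getD 0
     else (pvFind matrix p.2 p.1).getD 0) = score_match p matrix := by
  unfold score_match
  cases h : pvFind matrix p.1 p.2
  · simp [h]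
  · simp

-- the zip-with-shift start count equals the recursive run-start count
lemma pvStarts_eq (bs : List Bool) : ∀ g : Bool,
    ((((g :: bs).zip bs).countP (fun p => p.2 && !p.1) : Nat) : Int) = pvSB g bs := by
  induction bs with
  | nil => intro g; simp [pvSB]
  | cons b r ih =>
    intro g
    simp only [List.zip_cons_cons, List.countP_cons, pvSB]
    rw [← ih b]
    by_cases h : (b && !g) = true
    · simp [h]; ring
    · simp [h]

-- A's state machine over any pair list computes the aggregate closed form
lemma pvFold_eq (matrix : List (String × String × Int)) (gap_s gap_e : Int)
    (pairs : List (String × String)) : ∀ (g : Bool) (s : Int),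
    (pairs.foldl
      (fun (st : Int × Bool) (pair : String × String) =>
        if !st.2 then
          if pair.1 = "-" ∨ pair.2 = "-" then (st.1 + gap_s, true)
          else (st.1 + score_match pair matrix, false)
        else
          if ¬ (pair.1 = "-" ∨ pair.2 = "-") then (st.1 + score_match pair matrix, false)
          else (st.1 + gap_e, true))
      (s, g)).1 =
    s + pvM matrix pairs
      + gap_s * pvSB g (pairs.map pvIsGap)
      + gap_e * (((pairs.map pvIsGap).count true : Nat) - pvSB g (pairs.map pvIsGap)) := by
  induction pairs with
  | nil => intro g s; simp [pvM, pvSB]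
  | cons p rest ih =>
    intro g s
    by_cases hp : pvIsGap p = true
    · have hp' : p.1 = "-" ∨ p.2 = "-" := by simpa [pvIsGap] using hp
      cases g
      · simp only [List.foldl_cons, Bool.not_false, if_pos hp', if_true]
        rw [ih true (s + gap_s)]
        simp [pvM, pvSB, hp, List.count_cons]
        ring
      · simp only [List.foldl_cons, Bool.not_true, Bool.false_eq_true, if_false,
          if_neg (by simp [hp'] : ¬ ¬ (p.1 = "-" ∨ p.2 = "-"))]
        rw [ih true (s + gap_e)]
        simp [pvM, pvSB, hp, List.count_cons]
        ring
    · have hp' : ¬ (p.1 = "-" ∨ p.2 = "-") := by simpa [pvIsGap] using hp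
      cases g
      · simp only [List.foldl_cons, Bool.not_false, if_neg hp', if_true]
        rw [ih false (s + score_match p matrix)]
        simp [pvM, pvSB, hp, List.count_cons]
        ring
      · simp only [List.foldl_cons, Bool.not_true, Bool.false_eq_true, if_false, if_pos hp']
        rw [ih false (s + score_match p matrix)]
        simp [pvM, pvSB, hp, List.count_cons]
        ring

-- B's match-sum loop over indices computes pvM of the mapped pairs
lemma pvMatchSum_eq (seq1 seq2 : String) (matrix : List (String × String × Int))
    (l : List Int) : ∀ s : Int,
    (l.foldl
      (fun s i =>
        if !(pvFlagAt seq1 seq2 i) then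
          let a := (pvPairAt seq1 seq2 i).1
          let b := (pvPairAt seq1 seq2 i).2
          s + (if (pvFind matrix a b).isSome then (pvFind matrix a b).getD 0
               else (pvFind matrix b a).getD 0)
        else s) s) =
    s + pvM matrix (l.map (pvPairAt seq1 seq2)) := by
  induction l with
  | nil => intro s; simp [pvM]
  | cons i r ih =>
    intro s
    have hflag : pvFlagAt seq1 seq2 i = pvIsGap (pvPairAt seq1 seq2 i) := rfl
    simp only [List.foldl_cons, List.map_cons, pvM, hflag]
    by_cases h : pvIsGap (pvPairAt seq1 seq2 i) = true
    · rw [if_neg (by simp [h])]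
      rw [ih]
      simp [h]
    · rw [if_pos (by simp [h])]
      rw [ih]
      rw [pvMatch_eq]
      simp [h]
      ring

-- fold over indices = fold over mapped pairs (A side)
lemma pvMapFold (seq1 seq2 : String) (matrix : List (String × String × Int))
    (gap_s gap_e : Int) (l : List Int) : ∀ (init : Int × Bool),
    (l.foldl
      (fun (st : Int × Bool) i =>
        let pair := pvPairAt seq1 seq2 i
        if !st.2 then
          if pair.1 = "-" ∨ pair.2 = "-" then (st.1 + gap_s, true)
          else (st.1 + score_match pair matrix, false)
        else
          if ¬ (pair.1 = "-" ∨ pair.2 = "-") then (st.1 + score_match pair matrix, false)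
          else (st.1 + gap_e, true)) init) =
    ((l.map (pvPairAt seq1 seq2)).foldl
      (fun (st : Int × Bool) (pair : String × String) =>
        if !st.2 then
          if pair.1 = "-" ∨ pair.2 = "-" then (st.1 + gap_s, true)
          else (st.1 + score_match pair matrix, false)
        else
          if ¬ (pair.1 = "-" ∨ pair.2 = "-") then (st.1 + score_match pair matrix, false)
          else (st.1 + gap_e, true)) init) := by
  induction l with
  | nil => intro init; rfl
  | cons x xs ih => intro init; simp only [List.foldl_cons, List.map_cons]; exact ih _

-- ===== VERDICT (by name: the statement is the Claim_ definition above) =====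
theorem score_pairwise_spec : Claim_equal_score_pairwise := by
  intro seq1 seq2 matrix gap_s gap_e _hDom _hPre
  unfold Spec_score_pairwise score_pairwise score_pairwise_alt
  rw [show (fun (st : Int × Bool) (i : Int) =>
      let pair : String × String :=
        (((PySem.Str.pyGet? seq1 i).getD ' ').toString, ((PySem.Str.pyGet? seq2 i).getD ' ').toString)
      if !st.2 then
        if pair.1 = "-" ∨ pair.2 = "-" then (st.1 + gap_s, true)
        else (st.1 + score_match pair matrix, false)
      else
        if ¬ (pair.1 = "-" ∨ pair.2 = "-") then (st.1 + score_match pair matrix, false)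
        else (st.1 + gap_e, true)) =
    (fun (st : Int × Bool) (i : Int) =>
      let pair := pvPairAt seq1 seq2 i
      if !st.2 then
        if pair.1 = "-" ∨ pair.2 = "-" then (st.1 + gap_s, true)
        else (st.1 + score_match pair matrix, false)
      else
        if ¬ (pair.1 = "-" ∨ pair.2 = "-") then (st.1 + score_match pair matrix, false)
        else (st.1 + gap_e, true)) from rfl]
  rw [pvMapFold, pvFold_eq]
  have hmap : (PySem.List.pyRange 0 (PySem.Str.len seq1) 1).map (pvFlagAt seq1 seq2) =
      ((PySem.List.pyRange 0 (PySem.Str.len seq1) 1).map (pvPairAt seq1 seq2)).map pvIsGap := by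
    rw [List.map_map]; rfl
  simp only [pvMatchSum_eq, hmap, pvStarts_eq]
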